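-- pv_equiv track=rewrite | github.com/Adeline117/carbon-neutrality | data/pilot-scoring/analyze_options.py | apply_dq_caps
-- ===== SOURCE A (Python) =====
-- GRADE_ORDER = ["B", "BB", "BBB", "A", "AA", "AAA"]
--
-- def apply_dq_caps(g: str, flags: list[str]) -> str:
--     caps = {
--         "double_counting":      "B",
--         "failed_verification":  "B",
--         "human_rights":         "B",
--         "sanctioned_registry":  "BB",
--         "no_third_party":       "BBB",
--     }
--     for f in flags:
--         if f in caps:
--             c = caps[f]
--             if GRADE_ORDER.index(g) > GRADE_ORDER.index(c):
--                 g = c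
--     return g
-- ===== SOURCE B (Python) =====
-- GRADE_ORDER = ["B", "BB", "BBB", "A", "AA", "AAA"]
--
-- def apply_dq_caps(g: str, flags: list[str]) -> str:
--     fs = set(flags)
--     if ("double_counting" in fs or "failed_verification" in fs
--             or "human_rights" in fs):
--         cap = 0
--     elif "sanctioned_registry" in fs:
--         cap = 1
--     elif "no_third_party" in fs:
--         cap = 2
--     else:
--         return g
--     return GRADE_ORDER[min(GRADE_ORDER.index(g), cap)]
-- ===== Notes on version B (the rewrite author's own statement) =====
-- stated objective: alternative
-- what changed: A's per-flag dict-lookup loop with a running minimum grade is replaced by a tiered cap computation: one membership test per severity tier (via a set of the flags) determines the strongest applicable cap rank, and the result is read off GRADE_ORDER by index arithmetic min(rank(g), cap); no per-flag iteration or dict remains.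
import Mathlib
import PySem

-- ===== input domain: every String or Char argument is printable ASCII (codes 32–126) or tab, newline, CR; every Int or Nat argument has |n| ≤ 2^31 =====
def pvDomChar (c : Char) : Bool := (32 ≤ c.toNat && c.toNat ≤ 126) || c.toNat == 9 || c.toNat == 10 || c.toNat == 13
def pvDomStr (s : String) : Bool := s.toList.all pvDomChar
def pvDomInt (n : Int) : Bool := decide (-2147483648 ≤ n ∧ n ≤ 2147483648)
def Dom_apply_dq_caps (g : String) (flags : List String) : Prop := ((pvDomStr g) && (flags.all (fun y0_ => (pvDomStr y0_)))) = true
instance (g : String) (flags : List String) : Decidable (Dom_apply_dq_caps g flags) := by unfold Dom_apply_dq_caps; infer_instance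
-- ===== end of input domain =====

-- B replaces A's per-flag dict-lookup running-min loop by tiered set-membership tests that
-- determine the strongest applicable cap rank, then reads the result off GRADE_ORDER by index
-- arithmetic (alternative decomposition, same cost).


-- ===== PORT A =====
-- module constant GRADE_ORDER (shared by both ports, as in the Python module)
def pvGradeOrder : List String := ["B", "BB", "BBB", "A", "AA", "AAA"]

-- A's local caps dict
def pvCaps : PySem.Dict String String :=
  PySem.Dict.ofList [("double_counting", "B"), ("failed_verification", "B"),
    ("human_rights", "B"), ("sanctioned_registry", "BB"), ("no_third_party", "BBB")]

-- GRADE_ORDER.index(s); `none` (Python ValueError) is excluded by Pre_, the default 0 is unreachable there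
def pvGradeIdx (s : String) : Nat := (PySem.List.index? pvGradeOrder s).getD 0

def apply_dq_caps (g : String) (flags : List String) : String :=
  flags.foldl (fun g f =>
    match PySem.Dict.get? pvCaps f with
    | some c => if pvGradeIdx g > pvGradeIdx c then c else g
    | none => g) g

-- ===== PORT B =====
-- fs = set(flags); three tier membership tests decide cap; GRADE_ORDER[min(index(g), cap)]
-- (the subscript GRADE_ORDER[...] is in range whenever index(g) succeeds, excluded otherwise by Pre_)
def apply_dq_caps_alt (g : String) (flags : List String) : String :=
  let fs := PySem.Set.ofList flags
  let cap? : Option Nat :=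
    if PySem.Set.contains fs "double_counting" || PySem.Set.contains fs "failed_verification"
        || PySem.Set.contains fs "human_rights" then some 0
    else if PySem.Set.contains fs "sanctioned_registry" then some 1
    else if PySem.Set.contains fs "no_third_party" then some 2
    else none
  match cap? with
  | none => g
  | some cap => (PySem.List.pyGet? pvGradeOrder (Int.ofNat (min (pvGradeIdx g) cap))).getD ""

-- ===== PRECONDITION & SPEC =====
-- Pre_ excludes exactly the inputs where A raises ValueError: g not a valid grade while some flag is a cap key
-- (B raises ValueError on exactly the same inputs).
def Pre_apply_dq_caps (g : String) (flags : List String) : Prop :=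
  g ∈ ["B", "BB", "BBB", "A", "AA", "AAA"] ∨
  ∀ f ∈ flags, f ∉ ["double_counting", "failed_verification", "human_rights", "sanctioned_registry", "no_third_party"]
instance (g : String) (flags : List String) : Decidable (Pre_apply_dq_caps g flags) := by unfold Pre_apply_dq_caps; infer_instance

def pvWitness_apply_dq_caps : String × List String := ("AA", ["human_rights", "x"])

def Spec_apply_dq_caps (g : String) (flags : List String) (out : String) : Prop := out = apply_dq_caps_alt g flags
instance (g : String) (flags : List String) (out : String) : Decidable (Spec_apply_dq_caps g flags out) := by unfold Spec_apply_dq_caps; infer_instance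

-- ===== CLAIM =====
def Claim_equal_apply_dq_caps : Prop := ∀ (g : String) (flags : List String), Dom_apply_dq_caps g flags → Pre_apply_dq_caps g flags → Spec_apply_dq_caps g flags (apply_dq_caps g flags)

-- ===== LEMMAS AND PROOFS =====

-- [caps[f] for f in flags if f in caps] — proof-side abstraction of the grades A's loop can apply
def pvApplicable (flags : List String) : List String :=
  flags.filterMap (fun f => PySem.Dict.get? pvCaps f)

lemma caps_get_cases {f c : String} (h : PySem.Dict.get? pvCaps f = some c) :
    (f = "double_counting" ∧ c = "B") ∨ (f = "failed_verification" ∧ c = "B") ∨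
    (f = "human_rights" ∧ c = "B") ∨ (f = "sanctioned_registry" ∧ c = "BB") ∨
    (f = "no_third_party" ∧ c = "BBB") := by
  rw [show pvCaps = PySem.Dict.mk [("double_counting", "B"), ("failed_verification", "B"),
    ("human_rights", "B"), ("sanctioned_registry", "BB"), ("no_third_party", "BBB")] from by decide] at h
  simp only [PySem.Dict.get?_mk_cons] at h
  split_ifs at h <;> simp_all [PySem.Dict.get?]

lemma caps_get_mem {f c : String} (h : PySem.Dict.get? pvCaps f = some c) :
    c ∈ pvGradeOrder := by
  rcases caps_get_cases h with ⟨_, rfl⟩ | ⟨_, rfl⟩ | ⟨_, rfl⟩ | ⟨_, rfl⟩ | ⟨_, rfl⟩ <;> decide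

lemma caps_get_none {f : String}
    (h : f ∉ ["double_counting", "failed_verification", "human_rights", "sanctioned_registry", "no_third_party"]) :
    PySem.Dict.get? pvCaps f = none := by
  cases hc : PySem.Dict.get? pvCaps f with
  | none => rfl
  | some c =>
    exfalso; apply h
    rcases caps_get_cases hc with ⟨rfl, _⟩ | ⟨rfl, _⟩ | ⟨rfl, _⟩ | ⟨rfl, _⟩ | ⟨rfl, _⟩ <;> decide

lemma mem_grade_cases {a : String} (h : a ∈ pvGradeOrder) :
    a = "B" ∨ a = "BB" ∨ a = "BBB" ∨ a = "A" ∨ a = "AA" ∨ a = "AAA" := by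
  simpa [pvGradeOrder] using h

lemma idx_inj {a b : String} (ha : a ∈ pvGradeOrder) (hb : b ∈ pvGradeOrder)
    (h : pvGradeIdx a = pvGradeIdx b) : a = b := by
  rcases mem_grade_cases ha with rfl | rfl | rfl | rfl | rfl | rfl <;>
    rcases mem_grade_cases hb with rfl | rfl | rfl | rfl | rfl | rfl <;>
      first | rfl | (exfalso; revert h; decide)

lemma mem_applicable {flags : List String} {f c : String} (hf : f ∈ flags)
    (hc : PySem.Dict.get? pvCaps f = some c) : c ∈ pvApplicable flags := by
  simp only [pvApplicable, List.mem_filterMap]; exact ⟨f, hf, hc⟩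

-- A's loop result is a minimal-rank element of g together with the applicable caps
lemma A_min : ∀ (flags : List String) (g : String), g ∈ pvGradeOrder →
    apply_dq_caps g flags ∈ g :: pvApplicable flags ∧
    apply_dq_caps g flags ∈ pvGradeOrder ∧
    ∀ y ∈ g :: pvApplicable flags, pvGradeIdx (apply_dq_caps g flags) ≤ pvGradeIdx y := by
  intro flags
  induction flags with
  | nil => intro g hg; simp [apply_dq_caps, pvApplicable, hg]
  | cons f fs ih =>
    intro g hg
    cases hc : PySem.Dict.get? pvCaps f with
    | none =>
      have e1 : apply_dq_caps g (f :: fs) = apply_dq_caps g fs := by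
        simp [apply_dq_caps, List.foldl_cons, hc]
      have e2 : pvApplicable (f :: fs) = pvApplicable fs := by
        simp [pvApplicable, hc]
      rw [e1, e2]; exact ih g hg
    | some c =>
      have hcGO : c ∈ pvGradeOrder := caps_get_mem hc
      have e1 : apply_dq_caps g (f :: fs) =
          apply_dq_caps (if pvGradeIdx g > pvGradeIdx c then c else g) fs := by
        simp [apply_dq_caps, List.foldl_cons, hc]
      have e2 : pvApplicable (f :: fs) = c :: pvApplicable fs := by
        simp [pvApplicable, hc]
      set g' := if pvGradeIdx g > pvGradeIdx c then c else g with hg'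
      have hg'GO : g' ∈ pvGradeOrder := by rw [hg']; split <;> assumption
      have hg'g : pvGradeIdx g' ≤ pvGradeIdx g := by rw [hg']; split <;> omega
      have hg'c : pvGradeIdx g' ≤ pvGradeIdx c := by rw [hg']; split <;> omega
      have hg'mem : g' = c ∨ g' = g := by rw [hg']; split <;> simp
      obtain ⟨hmem, hGO, hmin⟩ := ih g' hg'GO
      rw [e1, e2]
      refine ⟨?_, hGO, ?_⟩
      · rcases List.mem_cons.mp hmem with h | h
        · rcases hg'mem with h' | h' <;> rw [h, h'] <;> simp
        · simp [h]
      · intro y hy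
        have hr : pvGradeIdx (apply_dq_caps g' fs) ≤ pvGradeIdx g' :=
          hmin g' (List.mem_cons_self ..)
        rcases List.mem_cons.mp hy with rfl | hy'
        · omega
        · rcases List.mem_cons.mp hy' with rfl | hy''
          · omega
          · exact hmin y (List.mem_cons_of_mem _ hy'')

-- when no flag is a cap key, A's loop leaves g unchanged
lemma A_id : ∀ (flags : List String) (g : String),
    (∀ f ∈ flags, PySem.Dict.get? pvCaps f = none) → apply_dq_caps g flags = g := by
  intro flags
  induction flags with
  | nil => intro g _; rfl
  | cons f fs ih =>
    intro g h
    have hc := h f (List.mem_cons_self ..)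
    have e1 : apply_dq_caps g (f :: fs) = apply_dq_caps g fs := by
      simp [apply_dq_caps, List.foldl_cons, hc]
    rw [e1]; exact ih g (fun f' hf' => h f' (List.mem_cons_of_mem _ hf'))

lemma set_contains_iff {flags : List String} {x : String} :
    PySem.Set.contains (PySem.Set.ofList flags) x = true ↔ x ∈ flags := by
  have h1 : PySem.Set.contains (PySem.Set.ofList flags) x = true ↔ x ∈ PySem.Set.ofList flags := by
    unfold PySem.Set.contains
    exact List.contains_iff_mem
  rw [h1]
  exact PySem.Set.mem_ofList flags x

-- B's result at a concrete cap rank k ≤ 2, for a valid grade g: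
-- it lies in GRADE_ORDER and its rank is min (rank g) k
lemma B_get_spec {g : String} (k : Nat) (hk : k ≤ 2) (hg : g ∈ pvGradeOrder) :
    (PySem.List.pyGet? pvGradeOrder (Int.ofNat (min (pvGradeIdx g) k))).getD "" ∈ pvGradeOrder ∧
    pvGradeIdx ((PySem.List.pyGet? pvGradeOrder (Int.ofNat (min (pvGradeIdx g) k))).getD "") =
      min (pvGradeIdx g) k := by
  rcases mem_grade_cases hg with rfl | rfl | rfl | rfl | rfl | rfl <;>
    interval_cases k <;> exact ⟨by decide, by decide⟩

lemma pre_valid {g : String} {flags : List String} (hpre : Pre_apply_dq_caps g flags)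
    {f c : String} (hf : f ∈ flags) (hc : PySem.Dict.get? pvCaps f = some c) :
    g ∈ pvGradeOrder := by
  rcases hpre with h | h
  · simpa [pvGradeOrder] using h
  · exfalso
    apply h f hf
    rcases caps_get_cases hc with ⟨rfl, _⟩ | ⟨rfl, _⟩ | ⟨rfl, _⟩ | ⟨rfl, _⟩ | ⟨rfl, _⟩ <;> decide

-- when the cap rank computed by B's tiers is k, A's loop returns GRADE_ORDER[min(index g, k)]
lemma main_case (g : String) (flags : List String) (hpre : Pre_apply_dq_caps g flags)
    (k : Nat) (hk : k ≤ 2)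
    (hkey : ∃ f ∈ flags, ∃ c, PySem.Dict.get? pvCaps f = some c ∧ pvGradeIdx c = k ∧
      (∀ f' ∈ flags, ∀ c', PySem.Dict.get? pvCaps f' = some c' → k ≤ pvGradeIdx c')) :
    apply_dq_caps g flags =
      (PySem.List.pyGet? pvGradeOrder (Int.ofNat (min (pvGradeIdx g) k))).getD "" := by
  obtain ⟨f, hf, c, hc, hck, hlb⟩ := hkey
  have hg : g ∈ pvGradeOrder := pre_valid hpre hf hc
  obtain ⟨hAmem, hAGO, hAmin⟩ := A_min flags g hg
  obtain ⟨hBGO, hBidx⟩ := B_get_spec k hk hg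
  apply idx_inj hAGO hBGO
  rw [hBidx]
  have h1 : pvGradeIdx (apply_dq_caps g flags) ≤ pvGradeIdx g :=
    hAmin g (List.mem_cons_self ..)
  have h2 : pvGradeIdx (apply_dq_caps g flags) ≤ k := by
    have := hAmin c (List.mem_cons_of_mem _ (mem_applicable hf hc))
    omega
  have h3 : min (pvGradeIdx g) k ≤ pvGradeIdx (apply_dq_caps g flags) := by
    rcases List.mem_cons.mp hAmem with heq | hmem
    · rw [heq]; omega
    · obtain ⟨f', hf', hc'⟩ := List.mem_filterMap.mp hmem
      have := hlb f' hf' _ hc'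
      omega
  omega

-- ===== VERDICT =====
theorem apply_dq_caps_spec : Claim_equal_apply_dq_caps := by
  intro g flags _ hpre
  unfold Spec_apply_dq_caps apply_dq_caps_alt
  by_cases h0 : "double_counting" ∈ flags ∨ "failed_verification" ∈ flags ∨ "human_rights" ∈ flags
  · have e0 : (PySem.Set.contains (PySem.Set.ofList flags) "double_counting"
        || PySem.Set.contains (PySem.Set.ofList flags) "failed_verification"
        || PySem.Set.contains (PySem.Set.ofList flags) "human_rights") = true := by
      simp [set_contains_iff]; tauto
    simp only [e0, if_true]
    have hkey : ∃ f ∈ flags, ∃ c, PySem.Dict.get? pvCaps f = some c ∧ pvGradeIdx c = 0 ∧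
        (∀ f' ∈ flags, ∀ c', PySem.Dict.get? pvCaps f' = some c' → 0 ≤ pvGradeIdx c') := by
      rcases h0 with h | h | h
      · exact ⟨"double_counting", h, "B", by decide, by decide, fun _ _ _ _ => Nat.zero_le _⟩
      · exact ⟨"failed_verification", h, "B", by decide, by decide, fun _ _ _ _ => Nat.zero_le _⟩
      · exact ⟨"human_rights", h, "B", by decide, by decide, fun _ _ _ _ => Nat.zero_le _⟩
    exact main_case g flags hpre 0 (by norm_num) hkey
  · push_neg at h0
    have e0 : (PySem.Set.contains (PySem.Set.ofList flags) "double_counting"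
        || PySem.Set.contains (PySem.Set.ofList flags) "failed_verification"
        || PySem.Set.contains (PySem.Set.ofList flags) "human_rights") = false := by
      simp [set_contains_iff]; tauto
    simp only [e0, Bool.false_eq_true, if_false]
    by_cases h1 : "sanctioned_registry" ∈ flags
    · have e1 : PySem.Set.contains (PySem.Set.ofList flags) "sanctioned_registry" = true := by
        simp [set_contains_iff]; tauto
      simp only [e1, if_true]
      have hkey : ∃ f ∈ flags, ∃ c, PySem.Dict.get? pvCaps f = some c ∧ pvGradeIdx c = 1 ∧
          (∀ f' ∈ flags, ∀ c', PySem.Dict.get? pvCaps f' = some c' → 1 ≤ pvGradeIdx c') := by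
        refine ⟨"sanctioned_registry", h1, "BB", by decide, by decide, ?_⟩
        intro f' hf' c' hc'
        rcases caps_get_cases hc' with ⟨rfl, rfl⟩ | ⟨rfl, rfl⟩ | ⟨rfl, rfl⟩ | ⟨rfl, rfl⟩ | ⟨rfl, rfl⟩
        · exact absurd hf' h0.1
        · exact absurd hf' h0.2.1
        · exact absurd hf' h0.2.2
        · decide
        · decide
      exact main_case g flags hpre 1 (by norm_num) hkey
    · have e1 : PySem.Set.contains (PySem.Set.ofList flags) "sanctioned_registry" = false := by
        simp [set_contains_iff]; tauto
      simp only [e1, Bool.false_eq_true, if_false]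
      by_cases h2 : "no_third_party" ∈ flags
      · have e2 : PySem.Set.contains (PySem.Set.ofList flags) "no_third_party" = true := by
          simp [set_contains_iff]; tauto
        simp only [e2, if_true]
        have hkey : ∃ f ∈ flags, ∃ c, PySem.Dict.get? pvCaps f = some c ∧ pvGradeIdx c = 2 ∧
            (∀ f' ∈ flags, ∀ c', PySem.Dict.get? pvCaps f' = some c' → 2 ≤ pvGradeIdx c') := by
          refine ⟨"no_third_party", h2, "BBB", by decide, by decide, ?_⟩
          intro f' hf' c' hc'
          rcases caps_get_cases hc' with ⟨rfl, rfl⟩ | ⟨rfl, rfl⟩ | ⟨rfl, rfl⟩ | ⟨rfl, rfl⟩ | ⟨rfl, rfl⟩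
          · exact absurd hf' h0.1
          · exact absurd hf' h0.2.1
          · exact absurd hf' h0.2.2
          · exact absurd hf' h1
          · decide
        exact main_case g flags hpre 2 (by norm_num) hkey
      · have e2 : PySem.Set.contains (PySem.Set.ofList flags) "no_third_party" = false := by
          simp [set_contains_iff]; tauto
        simp only [e2, Bool.false_eq_true, if_false]
        have hall : ∀ f ∈ flags, PySem.Dict.get? pvCaps f = none := by
          intro f hf
          apply caps_get_none
          intro hmem
          simp only [List.mem_cons, List.not_mem_nil, or_false] at hmem
          rcases hmem with rfl | rfl | rfl | rfl | rfl
          · exact h0.1 hf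
          · exact h0.2.1 hf
          · exact h0.2.2 hf
          · exact h1 hf
          · exact h2 hf
        exact A_id flags g hall
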